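-- pv_equiv track=rewrite | github.com/DREAM-DK/MAKRO | gamY/gamY.py | is_enclosed
-- ===== SOURCE A (Python) =====
-- def is_enclosed(expression):
--   """
--   Check if the the expression is enclosed in brackets
--
--   >>> is_enclosed('(foo)(bar)')
--   False
--   >>> is_enclosed('((foo)(bar))')
--   True
--   >>> is_enclosed('[[foo]{bar}]')
--   True
--   """
--   brackets = ["()", "[]", "{}"]
--   if expression[0] + expression[-1] not in brackets:
--     return False
--   for br in brackets:
--     open_count = 0
--     for char in expression[1:-1]:
--       if char == br[0]:
--         open_count += 1
--       if char == br[1]: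
--         open_count -= 1
--       if open_count < 0:
--         return False
--   return True
-- ===== SOURCE B (Python) =====
-- def is_enclosed(expression):
--     if (expression[0], expression[-1]) not in {('(', ')'), ('[', ']'), ('{', '}')}:
--         return False
--     counts = {'(': 0, '[': 0, '{': 0}
--     match = {')': '(', ']': '[', '}': '{'}
--     for ch in expression[1:-1]:
--         if ch in counts:
--             counts[ch] += 1
--         elif ch in match:
--             o = match[ch]
--             counts[o] -= 1
--             if counts[o] < 0:
--                 return False
--     return True
-- ===== Notes on version B (the rewrite author's own statement) =====
-- stated objective: alternative
-- what changed: Replaces A's three separate scans of the inner substring (one per bracket type) by a single pass maintaining all three counters in a dict, failing as soon as any counter goes negative; the deliberate absence of a final zero-balance check is preserved.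
import Mathlib
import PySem

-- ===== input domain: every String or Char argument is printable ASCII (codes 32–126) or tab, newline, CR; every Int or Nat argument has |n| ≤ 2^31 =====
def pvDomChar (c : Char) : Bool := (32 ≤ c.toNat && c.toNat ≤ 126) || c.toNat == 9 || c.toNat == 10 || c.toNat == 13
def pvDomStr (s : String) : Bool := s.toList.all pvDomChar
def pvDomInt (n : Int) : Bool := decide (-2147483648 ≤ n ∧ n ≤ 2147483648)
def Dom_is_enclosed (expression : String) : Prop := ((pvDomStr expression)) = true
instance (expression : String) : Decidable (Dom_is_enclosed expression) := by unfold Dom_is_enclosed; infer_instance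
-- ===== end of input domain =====

-- B replaces A's three separate scans of the inner substring (one per bracket type) with a
-- single pass keeping all three counters at once (objective: alternative decomposition, same O(n) cost).


-- ===== PORT A =====
-- inner loop of A for one bracket pair (o, c): 'for char in mid: …' with early return False
def scanA (o c : Char) : List Char → Int → Bool
  | [], _ => true
  | ch :: rest, n =>
    let n1 := if ch = o then n + 1 else n
    let n2 := if ch = c then n1 - 1 else n1
    if n2 < 0 then false else scanA o c rest n2

def is_enclosed (expression : String) : Bool :=
  let l := expression.toList
  match PySem.List.pyGet? l 0, PySem.List.pyGet? l (-1) with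
  | some f, some la =>
    -- expression[0] + expression[-1] not in ["()", "[]", "{}"]
    if [f, la] = ['(', ')'] ∨ [f, la] = ['[', ']'] ∨ [f, la] = ['{', '}'] then
      let mid := PySem.List.slice l (some 1) (some (-1))
      scanA '(' ')' mid 0 && scanA '[' ']' mid 0 && scanA '{' '}' mid 0
    else false
  | _, _ => false  -- IndexError on empty input; excluded by Pre_

-- ===== PORT B =====
-- single pass with the three counters p = counts['('], b = counts['['], c = counts['{']
def scanB : List Char → Int → Int → Int → Bool
  | [], _, _, _ => true
  | ch :: rest, p, b, c =>
    if ch = '(' then scanB rest (p + 1) b c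
    else if ch = '[' then scanB rest p (b + 1) c
    else if ch = '{' then scanB rest p b (c + 1)
    else if ch = ')' then (if p - 1 < 0 then false else scanB rest (p - 1) b c)
    else if ch = ']' then (if b - 1 < 0 then false else scanB rest p (b - 1) c)
    else if ch = '}' then (if c - 1 < 0 then false else scanB rest p b (c - 1))
    else scanB rest p b c

def is_enclosed_alt (expression : String) : Bool :=
  let l := expression.toList
  match PySem.List.pyGet? l 0 with
  | none => false  -- IndexError on empty input; excluded by Pre_
  | some f =>
    match PySem.List.pyGet? l (-1) with
    | none => false
    | some la =>
      if (f = '(' ∧ la = ')') ∨ (f = '[' ∧ la = ']') ∨ (f = '{' ∧ la = '}') then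
        scanB (PySem.List.slice l (some 1) (some (-1))) 0 0 0
      else false

-- ===== PRECONDITION & SPEC =====
-- Both programs raise IndexError on the empty string (expression[0]); Pre_ excludes exactly that input.
def Pre_is_enclosed (expression : String) : Prop := expression ≠ ""
instance (expression : String) : Decidable (Pre_is_enclosed expression) := by unfold Pre_is_enclosed; infer_instance
def pvWitness_is_enclosed : String := "((a)b)"

def Spec_is_enclosed (expression : String) (out : Bool) : Prop := out = is_enclosed_alt expression
instance (expression : String) (out : Bool) : Decidable (Spec_is_enclosed expression out) := by unfold Spec_is_enclosed; infer_instance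

-- ===== CLAIM (what is proved, stated in full; the proofs are below) =====
def Claim_equal_is_enclosed : Prop := ∀ (expression : String), Dom_is_enclosed expression → Pre_is_enclosed expression → Spec_is_enclosed expression (is_enclosed expression)

-- ===== LEMMAS AND PROOFS =====

-- one pass with three counters = three passes with one counter each (counters stay nonnegative)
theorem scanB_eq_scanA (l : List Char) : ∀ p b c : Int, 0 ≤ p → 0 ≤ b → 0 ≤ c →
    scanB l p b c = (scanA '(' ')' l p && scanA '[' ']' l b && scanA '{' '}' l c) := by
  induction l with
  | nil => intro p b c _ _ _; simp [scanA, scanB]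
  | cons ch rest IH =>
    intro p b c hp hb hc
    have hp0 : ¬ p < 0 := by omega
    have hb0 : ¬ b < 0 := by omega
    have hc0 : ¬ c < 0 := by omega
    have hp1 : ¬ p + 1 < 0 := by omega
    have hb1 : ¬ b + 1 < 0 := by omega
    have hc1 : ¬ c + 1 < 0 := by omega
    by_cases h1 : ch = '('
    · simp [scanB, scanA, h1, hp1, hb0, hc0, IH (p+1) b c (by omega) hb hc]
    by_cases h2 : ch = '['
    · simp [scanB, scanA, h2, hb1, hp0, hc0, IH p (b+1) c hp (by omega) hc]
    by_cases h3 : ch = '{'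
    · simp [scanB, scanA, h3, hc1, hp0, hb0, IH p b (c+1) hp hb (by omega)]
    by_cases h4 : ch = ')'
    · by_cases hq : p < 1
      · simp [scanB, scanA, h4, (show p - 1 < 0 by omega), hb0, hc0]
      · simp [scanB, scanA, h4, (show ¬ p - 1 < 0 by omega), hb0, hc0,
              IH (p-1) b c (by omega) hb hc]
    by_cases h5 : ch = ']'
    · by_cases hq : b < 1
      · simp [scanB, scanA, h5, (show b - 1 < 0 by omega), hp0, hc0]
      · simp [scanB, scanA, h5, (show ¬ b - 1 < 0 by omega), hp0, hc0,
              IH p (b-1) c hp (by omega) hc]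
    by_cases h6 : ch = '}'
    · by_cases hq : c < 1
      · simp [scanB, scanA, h6, (show c - 1 < 0 by omega), hp0, hb0]
      · simp [scanB, scanA, h6, (show ¬ c - 1 < 0 by omega), hp0, hb0,
              IH p b (c-1) hp hb (by omega)]
    · simp [scanB, scanA, h1, h2, h3, h4, h5, h6, hp0, hb0, hc0, IH p b c hp hb hc]

theorem toList_ne_nil_of_ne_empty {s : String} (h : s ≠ "") : s.toList ≠ [] := by
  simpa [String.toList_eq_nil_iff] using h

-- ===== VERDICT (by name: the statement is the Claim_ definition above) =====
theorem is_enclosed_spec : Claim_equal_is_enclosed := by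
  intro e _ hpre
  unfold Spec_is_enclosed
  have hl : e.toList ≠ [] := toList_ne_nil_of_ne_empty hpre
  unfold is_enclosed is_enclosed_alt
  cases hlist : e.toList with
  | nil => exact absurd hlist hl
  | cons x xs =>
    have hfst : PySem.List.pyGet? (x :: xs) 0 = some x := PySem.List.pyGet?_zero_cons x xs
    have hlast : ∃ y, PySem.List.pyGet? (x :: xs) (-1) = some y := by
      rw [PySem.List.pyGet?_neg_one]
      exact ⟨(x :: xs).getLast (by simp), List.getLast?_eq_some_getLast (by simp)⟩
    obtain ⟨y, hy⟩ := hlast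
    simp only [hfst, hy]
    have hguard : ([x, y] = ['(', ')'] ∨ [x, y] = ['[', ']'] ∨ [x, y] = ['{', '}']) ↔
        ((x = '(' ∧ y = ')') ∨ (x = '[' ∧ y = ']') ∨ (x = '{' ∧ y = '}')) := by
      simp
    split_ifs with hA hB hB
    · exact (scanB_eq_scanA _ 0 0 0 le_rfl le_rfl le_rfl).symm
    · exact absurd (hguard.mp hA) hB
    · exact absurd (hguard.mpr hB) hA
    · rfl
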